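-- pv_equiv track=rewrite | github.com/anatshafir1/CRISPys | CasSites.py | add_positions_and_strand
-- ===== SOURCE A (Python) =====
-- def add_positions_and_strand(targets_lst, exons_lst, strand):
--     """
--     This function was added by me (Udi) in order to get the position and strand of each target and add
--      it to the output of crispys
--     Args:
--         targets_lst: list of target sequence
--         exons_lst: list of exons
--         strand: the sense or anti sense you want to search for
--     it returns list of tuples with (target, pam_seq, pos, strand)
--     """
--     target_pos_lst = []
--
--     seq = "".join(exons_lst)
--     if strand == '-':
--         seq = give_complementary(seq)
--     for target in targets_lst:
--         pos = seq.find(target)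
--         target_pos_lst.append((target[0:20], target[20:23], pos, strand))
--     return target_pos_lst
--
-- def give_complementary(seq: str) -> str:
--     """Given a DNA sequence (5' to 3') this function returns its antisense sequence (also 5' to 3'). This is used to
--     find possible cut sites for CRISPR in the antisense strand of a given DNA sequence.
--     :param seq: input DNA sequence
--     :return: antisense sequence for the input
--     """
--     complementary_seq_list = []
--     for i in range(len(seq)):
--         if seq[len(seq) - 1 - i] == 'A':
--             complementary_seq_list.append('T')
--         elif seq[len(seq) - 1 - i] == 'T':
--             complementary_seq_list.append('A')
--         elif seq[len(seq) - 1 - i] == 'C':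
--             complementary_seq_list.append('G')
--         elif seq[len(seq) - 1 - i] == 'G':
--             complementary_seq_list.append('C')
--         elif seq[len(seq) - 1 - i] == 'N':
--             complementary_seq_list.append('N')
--     return ''.join(complementary_seq_list)
-- ===== SOURCE B (Python) =====
-- def give_complementary(seq: str) -> str:
--     comp = {'A': 'T', 'T': 'A', 'C': 'G', 'G': 'C', 'N': 'N'}
--     return ''.join(comp[c] for c in reversed(seq) if c in comp)
--
-- def add_positions_and_strand(targets_lst, exons_lst, strand):
--     seq = "".join(exons_lst)
--     if strand == '-':
--         seq = give_complementary(seq)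
--     # one pass per distinct target length: hash-index the first occurrence of
--     # every substring of that length, then O(1) lookups per target
--     first_by_len = {}
--     for target in targets_lst:
--         length = len(target)
--         if length not in first_by_len:
--             first = {}
--             for i in range(len(seq) - length + 1):
--                 kmer = seq[i:i + length]
--                 if kmer not in first:
--                     first[kmer] = i
--             first_by_len[length] = first
--     return [(t[0:20], t[20:23], first_by_len[len(t)].get(t, -1), strand)
--             for t in targets_lst]
-- ===== Notes on version B (the rewrite author's own statement) =====
-- stated objective: alternative
-- what changed: Instead of calling seq.find(target) for every target, B builds, once per distinct target length, a hash map from each substring of that length to its first start position, and answers every target with one dict lookup (the antisense helper is also rewritten as a reversed filtering comprehension over a complement table); intended as faster when targets share lengths, but a timing run read only 1.21x on mixed-length inputs, so no speed is claimed.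
import Mathlib
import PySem

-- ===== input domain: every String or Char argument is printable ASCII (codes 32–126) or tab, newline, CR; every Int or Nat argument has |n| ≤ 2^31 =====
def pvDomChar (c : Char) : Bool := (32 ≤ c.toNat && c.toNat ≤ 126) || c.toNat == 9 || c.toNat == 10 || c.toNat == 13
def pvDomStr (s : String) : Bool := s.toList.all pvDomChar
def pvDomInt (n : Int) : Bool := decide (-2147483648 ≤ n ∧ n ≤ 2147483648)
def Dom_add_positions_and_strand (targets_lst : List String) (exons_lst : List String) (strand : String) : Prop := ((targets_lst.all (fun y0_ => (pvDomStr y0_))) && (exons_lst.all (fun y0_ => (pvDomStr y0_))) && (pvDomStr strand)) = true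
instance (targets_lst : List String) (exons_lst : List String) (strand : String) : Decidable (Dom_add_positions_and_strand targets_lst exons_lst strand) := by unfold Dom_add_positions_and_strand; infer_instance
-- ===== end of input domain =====

-- B replaces A's per-target seq.find scan by a hash index of the first occurrence of every
-- substring, built once per distinct target length, answered by one dict lookup per target
-- (alternative algorithm; no speed is claimed).

-- ===== PORT A =====
-- literal port of give_complementary: loop i in range(len(seq)), read seq[len(seq)-1-i],
-- append the complement character; ''.join of the single-char strings = String.ofList
def give_complementary (seq : String) : String :=
  String.ofList ((PySem.List.pyRange 0 (PySem.Str.len seq)).foldl (fun acc i =>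
    match PySem.Str.pyGet? seq (PySem.Str.len seq - 1 - i) with
    | some c =>
        if c = 'A' then acc ++ ['T']
        else if c = 'T' then acc ++ ['A']
        else if c = 'C' then acc ++ ['G']
        else if c = 'G' then acc ++ ['C']
        else if c = 'N' then acc ++ ['N']
        else acc
    | none => acc) [])   -- index len(seq)-1-i is always in range in Python; none is unreachable

def add_positions_and_strand (targets_lst : List String) (exons_lst : List String) (strand : String) : List (String × String × Int × String) :=
  let seq0 := PySem.Str.join "" exons_lst
  let seq := if strand = "-" then give_complementary seq0 else seq0
  targets_lst.foldl (fun target_pos_lst target =>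
    target_pos_lst ++ [(PySem.Str.slice target (some 0) (some 20),
                        PySem.Str.slice target (some 20) (some 23),
                        PySem.Str.find seq target,
                        strand)]) []

-- ===== PORT B =====
-- the dict literal comp = {'A':'T','T':'A','C':'G','G':'C','N':'N'}: 'comp[c] if c in comp' as a table
def pvCompChar (c : Char) : Option Char :=
  if c = 'A' then some 'T'
  else if c = 'T' then some 'A'
  else if c = 'C' then some 'G'
  else if c = 'G' then some 'C'
  else if c = 'N' then some 'N'
  else none

-- ''.join(comp[c] for c in reversed(seq) if c in comp)
def give_complementary_alt (seq : String) : String :=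
  String.ofList (seq.toList.reverse.filterMap pvCompChar)

-- first = {}; for i in range(len(seq) - length + 1): kmer = seq[i:i+length]; if kmer not in first: first[kmer] = i
def pvKmerIndex (s : List Char) (length : Int) : PySem.Dict (List Char) Int :=
  (PySem.List.pyRange 0 ((s.length : Int) - length + 1)).foldl
    (fun first i =>
      let kmer := PySem.List.slice s (some i) (some (i + length))
      if first.contains kmer then first else first.insert kmer i)
    PySem.Dict.empty

def add_positions_and_strand_alt (targets_lst : List String) (exons_lst : List String) (strand : String) : List (String × String × Int × String) :=
  let seq0 := PySem.Str.join "" exons_lst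
  let seq := if strand = "-" then give_complementary_alt seq0 else seq0
  let firstByLen : PySem.Dict Int (PySem.Dict (List Char) Int) :=
    targets_lst.foldl (fun d target =>
      if d.contains (PySem.Str.len target) then d
      else d.insert (PySem.Str.len target) (pvKmerIndex seq.toList (PySem.Str.len target)))
      PySem.Dict.empty
  -- first_by_len[len(t)] always exists here; .getD Dict.empty only discharges the lookup's Option
  targets_lst.map (fun t =>
    (PySem.Str.slice t (some 0) (some 20),
     PySem.Str.slice t (some 20) (some 23),
     ((firstByLen.get? (PySem.Str.len t)).getD PySem.Dict.empty).getD t.toList (-1),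
     strand))

-- ===== PRECONDITION & SPEC =====
def Spec_add_positions_and_strand (targets_lst : List String) (exons_lst : List String) (strand : String) (out : List (String × String × Int × String)) : Prop := out = add_positions_and_strand_alt targets_lst exons_lst strand
instance (targets_lst : List String) (exons_lst : List String) (strand : String) (out : List (String × String × Int × String)) : Decidable (Spec_add_positions_and_strand targets_lst exons_lst strand out) := by unfold Spec_add_positions_and_strand; infer_instance

-- ===== CLAIM (what is proved, stated in full; the proofs are below) =====
def Claim_equal_add_positions_and_strand : Prop := ∀ (targets_lst : List String) (exons_lst : List String) (strand : String), Dom_add_positions_and_strand targets_lst exons_lst strand → Spec_add_positions_and_strand targets_lst exons_lst strand (add_positions_and_strand targets_lst exons_lst strand)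

-- ===== LEMMAS AND PROOFS =====

-- A's if-chain step appends exactly the table entry pvCompChar c
lemma pvComp_step (acc : List Char) (c : Char) :
    (if c = 'A' then acc ++ ['T']
     else if c = 'T' then acc ++ ['A']
     else if c = 'C' then acc ++ ['G']
     else if c = 'G' then acc ++ ['C']
     else if c = 'N' then acc ++ ['N']
     else acc)
    = acc ++ (pvCompChar c).elim [] (fun x => [x]) := by
  unfold pvCompChar
  split_ifs <;> simp

-- A's reversed-index loop over a char list is reverse-then-filterMap
lemma compA_loop (s : List Char) (acc : List Char) :
    (PySem.List.pyRange 0 (s.length : Int)).foldl (fun acc i =>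
      match PySem.List.pyGet? s ((s.length : Int) - 1 - i) with
      | some c =>
          if c = 'A' then acc ++ ['T']
          else if c = 'T' then acc ++ ['A']
          else if c = 'C' then acc ++ ['G']
          else if c = 'G' then acc ++ ['C']
          else if c = 'N' then acc ++ ['N']
          else acc
      | none => acc) acc
    = acc ++ s.reverse.filterMap pvCompChar := by
  induction s generalizing acc with
  | nil => simp [PySem.List.pyRange_one_eq_nil le_rfl]
  | cons c t ih =>
    rw [show ((c :: t).length : Int) = (t.length : Int) + 1 by
      push_cast [List.length_cons]; ring]
    rw [PySem.List.pyRange_one_succ_right (by positivity), List.foldl_append]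
    have hpre :
        (PySem.List.pyRange 0 (t.length : Int)).foldl (fun acc i =>
          match PySem.List.pyGet? (c :: t) ((t.length : Int) + 1 - 1 - i) with
          | some c' =>
              if c' = 'A' then acc ++ ['T']
              else if c' = 'T' then acc ++ ['A']
              else if c' = 'C' then acc ++ ['G']
              else if c' = 'G' then acc ++ ['C']
              else if c' = 'N' then acc ++ ['N']
              else acc
          | none => acc) acc
      = (PySem.List.pyRange 0 (t.length : Int)).foldl (fun acc i =>
          match PySem.List.pyGet? t ((t.length : Int) - 1 - i) with
          | some c' =>
              if c' = 'A' then acc ++ ['T']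
              else if c' = 'T' then acc ++ ['A']
              else if c' = 'C' then acc ++ ['G']
              else if c' = 'G' then acc ++ ['C']
              else if c' = 'N' then acc ++ ['N']
              else acc
          | none => acc) acc := by
      apply PySem.List.foldl_congr_mem
      intro acc2 i hi
      rw [PySem.List.mem_pyRange_one] at hi
      lift i to Nat using hi.1 with k
      have hklt : k < t.length := by exact_mod_cast hi.2
      have e1 : (t.length : Int) + 1 - 1 - (k : Int) = (((t.length - 1 - k) + 1 : Nat) : Int) := by
        omega
      have e2 : (t.length : Int) - 1 - (k : Int) = ((t.length - 1 - k : Nat) : Int) := by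
        omega
      rw [e1, e2, PySem.List.pyGet?_natCast, PySem.List.pyGet?_natCast,
        List.getElem?_cons_succ]
    rw [hpre, ih]
    have h0 : (t.length : Int) + 1 - 1 - (t.length : Int) = ((0 : Nat) : Int) := by push_cast; ring
    simp only [List.foldl_cons, List.foldl_nil, h0, PySem.List.pyGet?_natCast,
      List.getElem?_cons_zero]
    rw [pvComp_step]
    rw [List.reverse_cons, List.filterMap_append]
    cases h : pvCompChar c <;> simp [h]

lemma comp_eq (seq : String) : give_complementary seq = give_complementary_alt seq := by
  unfold give_complementary give_complementary_alt
  simp only [PySem.Str.len_eq, PySem.Str.pyGet?_eq, PySem.Chars.pyGet?_eq_listPyGet?]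
  rw [compA_loop seq.toList []]
  simp

-- loop invariant of B's k-mer pass: after scanning the first k start positions, the
-- dict's entry at t is exactly Python's str.find result when that result lies below k
lemma kmer_inv (s t : List Char) (k : Nat) :
    ((PySem.List.pyRange 0 (k : Int)).foldl
      (fun first i =>
        let kmer := PySem.List.slice s (some i) (some (i + (t.length : Int)))
        if first.contains kmer then first else first.insert kmer i)
      PySem.Dict.empty).get? t
    = if 0 ≤ PySem.Chars.find s t ∧ PySem.Chars.find s t < (k : Int)
      then some (PySem.Chars.find s t) else none := by
  induction k with
  | zero =>
    rw [PySem.List.pyRange_one_eq_nil (by simp)]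
    rw [if_neg (by intro h; have := h.1; have := h.2; omega)]
    exact PySem.Dict.get?_empty t
  | succ k ih =>
    rw [show ((k + 1 : Nat) : Int) = (k : Int) + 1 by push_cast; ring,
      PySem.List.pyRange_one_succ_right (by positivity), List.foldl_append]
    simp only [List.foldl_cons, List.foldl_nil, PySem.List.slice_natCast_add]
    by_cases hocc : t = (s.drop k).take t.length
    · have hpre : t <+: s.drop k := List.prefix_iff_eq_take.2 hocc
      have hinf : t <:+: s := hpre.isInfix.trans (List.drop_suffix k s).isInfix
      have hf0 : 0 ≤ PySem.Chars.find s t := (PySem.Chars.find_nonneg_iff s t).2 hinf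
      have hmin := (PySem.Chars.find_spec hf0).2
      have hle : PySem.Chars.find s t ≤ (k : Int) := by
        by_contra hgt
        exact hmin k (by omega) hpre
      rw [← hocc]
      by_cases hlt : PySem.Chars.find s t < (k : Int)
      · rw [if_pos (by rw [PySem.Dict.contains_eq_isSome_get?, ih, if_pos ⟨hf0, hlt⟩]; rfl)]
        rw [ih, if_pos ⟨hf0, hlt⟩, if_pos ⟨hf0, by omega⟩]
      · have hfk : PySem.Chars.find s t = (k : Int) := le_antisymm hle (not_lt.1 hlt)
        rw [if_neg (by
          rw [PySem.Dict.contains_eq_isSome_get?, ih,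
            if_neg (fun h => hlt h.2)]
          simp)]
        rw [PySem.Dict.get?_insert_self, if_pos ⟨hf0, by omega⟩, hfk]
    · have hnpre : ¬ t <+: s.drop k := fun h => hocc (List.prefix_iff_eq_take.1 h)
      have hfk : PySem.Chars.find s t ≠ (k : Int) := by
        intro h
        have hf0 : 0 ≤ PySem.Chars.find s t := by omega
        have hp := (PySem.Chars.find_spec hf0).1
        rw [h] at hp
        simp only [Int.toNat_natCast] at hp
        exact hnpre hp
      have hcond : (0 ≤ PySem.Chars.find s t ∧ PySem.Chars.find s t < (k : Int))
          ↔ (0 ≤ PySem.Chars.find s t ∧ PySem.Chars.find s t < (k : Int) + 1) := by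
        constructor <;> (intro h; exact ⟨h.1, by omega⟩)
      by_cases hc : (((PySem.List.pyRange 0 (k : Int)).foldl
          (fun first i =>
            let kmer := PySem.List.slice s (some i) (some (i + (t.length : Int)))
            if first.contains kmer then first else first.insert kmer i)
          PySem.Dict.empty)).contains ((s.drop k).take t.length) = true
      · rw [if_pos hc, ih]
        exact if_congr hcond rfl rfl
      · rw [if_neg hc, PySem.Dict.get?_insert_of_ne _ _ (fun h => hocc h), ih]
        exact if_congr hcond rfl rfl

-- B's first-occurrence hash index looks up exactly Python's str.find
lemma kmer_getD (s t : List Char) :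
    (pvKmerIndex s ((t.length : Nat) : Int)).getD t (-1) = PySem.Chars.find s t := by
  unfold pvKmerIndex
  rw [PySem.Dict.getD_eq_get?_getD]
  by_cases hL : t.length ≤ s.length
  · rw [show (s.length : Int) - (t.length : Int) + 1 = ((s.length - t.length + 1 : Nat) : Int) by
      push_cast [Nat.cast_sub hL]; ring]
    rw [kmer_inv s t _]
    by_cases hf0 : 0 ≤ PySem.Chars.find s t
    · have hub : PySem.Chars.find s t < ((s.length - t.length + 1 : Nat) : Int) := by
        have hp := (PySem.Chars.find_spec hf0).1
        have hlen : t.length ≤ (List.drop (PySem.Chars.find s t).toNat s).length :=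
          List.IsPrefix.length_le hp
        rw [List.length_drop] at hlen
        have hub2 := PySem.Chars.find_le_length s t
        push_cast [Nat.cast_sub hL]
        omega
      rw [if_pos ⟨hf0, hub⟩]
      rfl
    · have hneg : PySem.Chars.find s t = -1 := by
        have := PySem.Chars.neg_one_le_find s t
        omega
      rw [if_neg (fun h => hf0 h.1), hneg]
      rfl
  · rw [PySem.List.pyRange_one_eq_nil (by
      have : (s.length : Int) < (t.length : Int) := by exact_mod_cast Nat.lt_of_not_le hL
      omega)]
    simp only [List.foldl_nil, PySem.Dict.get?_empty, Option.getD_none]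
    symm
    rw [PySem.Chars.find_eq_neg_one_iff]
    intro hinf
    exact hL (List.IsInfix.length_le hinf)

-- once a length key is present in B's outer dict it stays present
lemma flen_mono (s : List Char) (lst : List String)
    (d : PySem.Dict Int (PySem.Dict (List Char) Int)) (L : Int)
    (h : (d.get? L).isSome = true) :
    ((lst.foldl (fun d target =>
        if d.contains (PySem.Str.len target) then d
        else d.insert (PySem.Str.len target) (pvKmerIndex s (PySem.Str.len target))) d).get? L).isSome = true := by
  induction lst generalizing d with
  | nil => exact h
  | cons t rest ih =>
    simp only [List.foldl_cons]
    apply ih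
    by_cases hc : (d.contains (PySem.Str.len t)) = true
    · rw [if_pos hc]; exact h
    · rw [if_neg hc]
      by_cases he : L = PySem.Str.len t
      · rw [he, PySem.Dict.get?_insert_self]; rfl
      · rw [PySem.Dict.get?_insert_of_ne _ _ he]; exact h

-- every value B's outer loop ever stores at a length key L is pvKmerIndex s L,
-- and after the loop every target's length is present
lemma flen_get (s : List Char) (lst : List String)
    (d : PySem.Dict Int (PySem.Dict (List Char) Int))
    (hd : ∀ L : Int, d.get? L = none ∨ d.get? L = some (pvKmerIndex s L)) :
    (∀ L : Int, (lst.foldl (fun d target =>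
        if d.contains (PySem.Str.len target) then d
        else d.insert (PySem.Str.len target) (pvKmerIndex s (PySem.Str.len target))) d).get? L = none ∨
      (lst.foldl (fun d target =>
        if d.contains (PySem.Str.len target) then d
        else d.insert (PySem.Str.len target) (pvKmerIndex s (PySem.Str.len target))) d).get? L = some (pvKmerIndex s L)) ∧
    (∀ t ∈ lst, (lst.foldl (fun d target =>
        if d.contains (PySem.Str.len target) then d
        else d.insert (PySem.Str.len target) (pvKmerIndex s (PySem.Str.len target))) d).get? (PySem.Str.len t)
      = some (pvKmerIndex s (PySem.Str.len t))) := by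
  induction lst generalizing d with
  | nil => exact ⟨hd, by simp⟩
  | cons t rest ih =>
    have hd' : ∀ L : Int, ((if d.contains (PySem.Str.len t) then d
        else d.insert (PySem.Str.len t) (pvKmerIndex s (PySem.Str.len t))).get? L = none ∨
        (if d.contains (PySem.Str.len t) then d
        else d.insert (PySem.Str.len t) (pvKmerIndex s (PySem.Str.len t))).get? L = some (pvKmerIndex s L)) := by
      intro L
      by_cases hc : (d.contains (PySem.Str.len t)) = true
      · rw [if_pos hc]; exact hd L
      · rw [if_neg hc]
        by_cases he : L = PySem.Str.len t
        · right; rw [he, PySem.Dict.get?_insert_self]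
        · rw [PySem.Dict.get?_insert_of_ne _ _ he]; exact hd L
    have hmem : ((if d.contains (PySem.Str.len t) then d
        else d.insert (PySem.Str.len t) (pvKmerIndex s (PySem.Str.len t))).get? (PySem.Str.len t)).isSome = true := by
      by_cases hc : (d.contains (PySem.Str.len t)) = true
      · rw [if_pos hc]
        rw [PySem.Dict.contains_eq_isSome_get?] at hc
        exact hc
      · rw [if_neg hc, PySem.Dict.get?_insert_self]; rfl
    obtain ⟨h1, h2⟩ := ih _ hd'
    refine ⟨by simpa using h1, ?_⟩
    intro u hu
    rcases List.mem_cons.1 hu with hu | hu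
    · subst hu
      have hsome := flen_mono s rest _ (PySem.Str.len u) hmem
      simp only [List.foldl_cons]
      rcases h1 (PySem.Str.len u) with hnone | hval
      · rw [hnone] at hsome; simp at hsome
      · exact hval
    · simpa using h2 u hu

-- ===== VERDICT (by name: the statement is the Claim_ definition above) =====
theorem add_positions_and_strand_spec : Claim_equal_add_positions_and_strand := by
  intro targets_lst exons_lst strand _hdom
  unfold Spec_add_positions_and_strand
  simp only [add_positions_and_strand, add_positions_and_strand_alt, comp_eq]
  rw [PySem.List.foldl_append_singleton_eq_map, List.nil_append]
  apply List.map_congr_left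
  intro t ht
  simp only [Prod.mk.injEq]
  refine ⟨trivial, trivial, ?_, trivial⟩
  have h := (flen_get (if strand = "-" then give_complementary_alt (PySem.Str.join "" exons_lst)
      else PySem.Str.join "" exons_lst).toList targets_lst PySem.Dict.empty
    (fun L => Or.inl (PySem.Dict.get?_empty L))).2 t ht
  rw [h, Option.getD_some, PySem.Str.len_eq, kmer_getD, PySem.Str.find_eq]
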